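-- pv_equiv track=rewrite | github.com/miliar/Code_Jam_Webscraper | solutions_python/solutions_year16_round1_nr1/2007.py | solve
-- ===== SOURCE A (Python) =====
-- def solve(s,*args,**kwargs):
--     solution = ""
--     for c in s:
--         if len(solution)==0 or c>=solution[0]:
--             solution = c+solution
--         else:
--             solution = solution+c
--     return solution
-- ===== SOURCE B (Python) =====
-- def solve(s,*args,**kwargs):
--     pm = []
--     m = ''
--     for c in s:
--         if c > m:
--             m = c
--         pm.append(m)
--     pre = [c for c, m in zip(s, pm) if c == m]
--     suf = [c for c, m in zip(s, pm) if c != m]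
--     return ''.join(reversed(pre)) + ''.join(suf)
-- ===== Notes on version B (the rewrite author's own statement) =====
-- stated objective: faster
-- what changed: Replaces A's stateful loop that grows one string by conditional prepend/append with staged passes: first build the prefix-maximum array, then declaratively select the chars equal / not equal to their prefix maximum and return reversed(pre) + suf.
import Mathlib
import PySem

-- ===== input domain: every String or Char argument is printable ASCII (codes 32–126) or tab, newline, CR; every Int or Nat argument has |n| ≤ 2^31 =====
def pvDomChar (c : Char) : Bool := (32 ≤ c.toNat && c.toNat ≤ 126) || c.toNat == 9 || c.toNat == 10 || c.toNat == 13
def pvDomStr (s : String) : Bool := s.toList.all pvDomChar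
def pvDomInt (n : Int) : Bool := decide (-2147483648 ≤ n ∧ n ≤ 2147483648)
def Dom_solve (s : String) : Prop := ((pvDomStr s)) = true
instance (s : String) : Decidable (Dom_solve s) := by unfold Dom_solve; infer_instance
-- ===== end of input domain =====

-- B replaces A's loop that grows one string by conditional prepend/append with staged
-- passes: build the prefix-maximum array, then declaratively select the chars equal /
-- not equal to their prefix maximum and return reversed(pre) + suf.

-- ===== PORT A =====
-- A's loop: solution starts empty; each char is prepended if solution is empty
-- or c >= solution[0], otherwise appended.
def solveGo : List Char → List Char → List Char
  | sol, [] => sol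
  | sol, c :: cs =>
    match sol with
    | [] => solveGo [c] cs
    | h :: t => if h ≤ c then solveGo (c :: h :: t) cs else solveGo ((h :: t) ++ [c]) cs

def solve (s : String) : String := String.mk (solveGo [] s.toList)

-- ===== PORT B =====
-- Source B pass 1: running maximum m (Python's '' start is 'no char yet' → Option) and the
-- appended prefix-maximum list pm.
def pmStep (st : Option Char × List Char) (c : Char) : Option Char × List Char :=
  match st.1 with
  | none => (some c, st.2 ++ [c])
  | some v => if v < c then (some c, st.2 ++ [c]) else (some v, st.2 ++ [v])

def pmL (l : List Char) : List Char := (l.foldl pmStep (none, [])).2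

-- Source B pass 2/3: the two comprehensions over zip(s, pm), then reversed(pre) + suf
def solve_alt (s : String) : String :=
  let l := s.toList
  let pm := pmL l
  let pre := ((l.zip pm).filter (fun p => p.1 == p.2)).map Prod.fst
  let suf := ((l.zip pm).filter (fun p => !(p.1 == p.2))).map Prod.fst
  String.mk (pre.reverse ++ suf)

-- ===== PRECONDITION & SPEC =====
def Spec_solve (s : String) (out : String) : Prop := out = solve_alt s
instance (s : String) (out : String) : Decidable (Spec_solve s out) := by unfold Spec_solve; infer_instance

-- ===== CLAIM (what is proved, stated in full; the proofs are below) =====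
def Claim_equal_solve : Prop := ∀ (s : String), Dom_solve s → Spec_solve s (solve s)

-- ===== LEMMAS AND PROOFS =====

-- proof-only characterisation: the maximum of a nonempty char list, and the
-- "record chars" / "non-record chars" of l via the prefix maximum at each index
def pyMaxChars : List Char → Char
  | [] => 'a'
  | h :: t => t.foldl max h

def preF (l : List Char) : List Char :=
  (l.zipIdx.filter (fun p => p.1 == pyMaxChars (l.take (p.2 + 1)))).map Prod.fst
def sufF (l : List Char) : List Char :=
  (l.zipIdx.filter (fun p => !(p.1 == pyMaxChars (l.take (p.2 + 1))))).map Prod.fst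

theorem solveGo_append (xs : List Char) :
    ∀ (sol : List Char) (ys : List Char), solveGo sol (xs ++ ys) = solveGo (solveGo sol xs) ys := by
  induction xs with
  | nil => intro sol ys; simp [solveGo]
  | cons c cs ih =>
    intro sol ys
    cases sol with
    | nil => simpa [solveGo] using ih [c] ys
    | cons h t =>
      by_cases hc : h ≤ c
      · simpa [solveGo, hc] using ih (c :: h :: t) ys
      · simpa [solveGo, hc] using ih ((h :: t) ++ [c]) ys

theorem pyMaxChars_append (l : List Char) (c : Char) (h : l ≠ []) :
    pyMaxChars (l ++ [c]) = max (pyMaxChars l) c := by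
  cases l with
  | nil => exact absurd rfl h
  | cons a t => simp [pyMaxChars, List.foldl_append]

theorem beq_max_iff (m c : Char) : (c == max m c) = decide (m ≤ c) := by
  by_cases h : m ≤ c
  · simp [h]
  · have hne : c ≠ max m c := by
      have : c < m := lt_of_not_ge h
      rw [max_eq_left (le_of_lt this)]
      exact ne_of_lt this
    simp [h, hne]

-- the per-entry predicate is unchanged on old entries when a char is appended
theorem filter_zipIdx_append (l : List Char) (c : Char) (f : Char × Nat → Bool) :
    ∀ (g : Char × Nat → Bool), (∀ p ∈ l.zipIdx, g p = f p) →
      ((l ++ [c]).zipIdx.filter g) = l.zipIdx.filter f ++ [(c, l.length)].filter g := by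
  intro g hg
  rw [List.zipIdx_append, List.filter_append, List.filter_congr hg]
  simp

theorem take_pred_stable (l : List Char) (c : Char) (p : Char × Nat) (hp : p ∈ l.zipIdx) :
    ((l ++ [c]).take (p.2 + 1)) = l.take (p.2 + 1) := by
  obtain ⟨c', i⟩ := p
  have h := List.mem_zipIdx hp
  exact List.take_append_of_le_length (by omega)

theorem new_entry_pred (l : List Char) (c : Char) (h : l ≠ []) :
    (c == pyMaxChars ((l ++ [c]).take (l.length + 1))) = decide (pyMaxChars l ≤ c) := by
  have ht : (l ++ [c]).take (l.length + 1) = l ++ [c] := by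
    apply List.take_of_length_le; simp
  rw [ht, pyMaxChars_append l c h, beq_max_iff]

theorem preF_append (l : List Char) (c : Char) (h : l ≠ []) :
    preF (l ++ [c]) = preF l ++ (if pyMaxChars l ≤ c then [c] else []) := by
  unfold preF
  rw [filter_zipIdx_append l c (fun p => p.1 == pyMaxChars (l.take (p.2 + 1)))
        (fun p => p.1 == pyMaxChars ((l ++ [c]).take (p.2 + 1)))
        (fun p hp => by simp only [take_pred_stable l c p hp])]
  rw [List.map_append]
  congr 1
  simp only [List.filter, new_entry_pred l c h]
  by_cases hle : pyMaxChars l ≤ c <;> simp [hle]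

theorem sufF_append (l : List Char) (c : Char) (h : l ≠ []) :
    sufF (l ++ [c]) = sufF l ++ (if pyMaxChars l ≤ c then [] else [c]) := by
  unfold sufF
  rw [filter_zipIdx_append l c (fun p => !(p.1 == pyMaxChars (l.take (p.2 + 1))))
        (fun p => !(p.1 == pyMaxChars ((l ++ [c]).take (p.2 + 1))))
        (fun p hp => by simp only [take_pred_stable l c p hp])]
  rw [List.map_append]
  congr 1
  simp only [List.filter, new_entry_pred l c h]
  by_cases hle : pyMaxChars l ≤ c <;> simp [hle]

-- A's loop state = reversed record chars ++ non-record chars, with the head the max so far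
theorem solveGo_main (l : List Char) :
    solveGo [] l = (preF l).reverse ++ sufF l ∧
      (l ≠ [] → (solveGo [] l).head? = some (pyMaxChars l)) := by
  induction l using List.reverseRecOn with
  | nil => exact ⟨by simp [solveGo, preF, sufF], fun h => absurd rfl h⟩
  | append_singleton l c ih =>
    rw [solveGo_append]
    cases l with
    | nil =>
      constructor
      · simp [solveGo, preF, sufF, pyMaxChars]
      · intro _; simp [solveGo, pyMaxChars]
    | cons a t =>
      obtain ⟨hrep, hhd⟩ := ih
      have hne : a :: t ≠ [] := by simp
      obtain ⟨rest, hsol⟩ : ∃ rest, solveGo [] (a :: t) = pyMaxChars (a :: t) :: rest := by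
        have h1 := hhd hne
        cases hs : solveGo [] (a :: t) with
        | nil => rw [hs] at h1; simp at h1
        | cons x xs =>
          rw [hs] at h1; simp at h1
          exact ⟨xs, by rw [h1]⟩
      rw [hsol, preF_append _ _ hne, sufF_append _ _ hne,
          pyMaxChars_append _ _ hne]
      rw [hsol] at hrep
      by_cases hle : pyMaxChars (a :: t) ≤ c
      · refine ⟨?_, fun _ => ?_⟩
        · simp [solveGo, hle, hrep]
        · simp [solveGo, hle]
      · refine ⟨?_, fun _ => ?_⟩
        · simp [solveGo, hle, hrep]
        · have : c ≤ pyMaxChars (a :: t) := le_of_lt (lt_of_not_ge hle)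
          simp [solveGo, hle, max_eq_left this]

-- ----- B's passes compute exactly the preF/sufF characterisation -----

theorem pmState (l : List Char) (h : l ≠ []) :
    (l.foldl pmStep (none, [])).1 = some (pyMaxChars l) := by
  induction l using List.reverseRecOn with
  | nil => exact absurd rfl h
  | append_singleton l c ih =>
    rw [List.foldl_append]
    cases hl : l with
    | nil => simp [pmStep, pyMaxChars]
    | cons a t =>
      rw [← hl]
      have hne : l ≠ [] := by rw [hl]; simp
      have hfst := ih hne
      rcases hst : l.foldl pmStep (none, []) with ⟨m, pm⟩
      rw [hst] at hfst
      simp only at hfst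
      subst hfst
      by_cases hlt : pyMaxChars l < c
      · simp [pmStep, hlt, pyMaxChars_append l c hne, max_eq_right (le_of_lt hlt)]
      · simp [pmStep, hlt, pyMaxChars_append l c hne, max_eq_left (le_of_not_gt hlt)]

theorem pmL_append (l : List Char) (c : Char) (h : l ≠ []) :
    pmL (l ++ [c]) = pmL l ++ [max (pyMaxChars l) c] := by
  unfold pmL
  rw [List.foldl_append]
  have hfst := pmState l h
  rcases hst : l.foldl pmStep (none, []) with ⟨m, pm⟩
  rw [hst] at hfst
  simp only at hfst
  subst hfst
  by_cases hlt : pyMaxChars l < c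
  · simp [pmStep, hlt, max_eq_right (le_of_lt hlt)]
  · simp [pmStep, hlt, max_eq_left (le_of_not_gt hlt)]

theorem pmL_length (l : List Char) : (pmL l).length = l.length := by
  induction l using List.reverseRecOn with
  | nil => simp [pmL]
  | append_singleton l c ih =>
    cases hl : l with
    | nil => simp [pmL, pmStep]
    | cons a t =>
      rw [← hl, pmL_append l c (by rw [hl]; simp)]
      simp [ih]

-- zip(s, pm) is exactly the zipIdx entries tagged with their prefix maximum
theorem zip_pmL (l : List Char) :
    l.zip (pmL l) = l.zipIdx.map (fun p => (p.1, pyMaxChars (l.take (p.2 + 1)))) := by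
  induction l using List.reverseRecOn with
  | nil => simp [pmL]
  | append_singleton l c ih =>
    cases hl : l with
    | nil => simp [pmL, pmStep, pyMaxChars]
    | cons a t =>
      rw [← hl]
      have hne : l ≠ [] := by rw [hl]; simp
      rw [pmL_append l c hne,
          List.zip_append (by rw [pmL_length]), ih,
          List.zipIdx_append, List.map_append]
      congr 1
      · apply List.map_congr_left
        intro p hp
        rw [take_pred_stable l c p hp]
      · have ht : (l ++ [c]).take (l.length + 1) = l ++ [c] := by
          apply List.take_of_length_le; simp
        simp [ht, pyMaxChars_append l c hne]

theorem solve_alt_char (s : String) :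
    solve_alt s = String.mk ((preF s.toList).reverse ++ sufF s.toList) := by
  unfold solve_alt preF sufF
  dsimp only
  rw [zip_pmL, List.filter_map, List.filter_map, List.map_map, List.map_map]
  congr 2

-- ===== VERDICT (by name: the statement is the Claim_ definition above) =====
theorem solve_spec : Claim_equal_solve := by
  intro s _
  unfold Spec_solve solve
  rw [solve_alt_char, (solveGo_main s.toList).1]
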